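-- pv_equiv track=rewrite | github.com/JuanMartinFajardo/Bachelor-Thesis | get_the_complex.py | sorter1
-- ===== SOURCE A (Python) =====
-- def dimension(N):
-- 	out = 0
-- 	for s in N:
-- 		if len(s)>out: out = len(s)
-- 	return out-1
--
-- def sorter1(N):
-- 	d = dimension(N)
-- 	Simplices = {}
-- 	for i in range(0,d+1):
-- 		i_simplices = []
-- 		for s in N:
-- 			if len(s)==i+1: i_simplices.append(s)
-- 		Simplices[i]=sorted(i_simplices)
-- 	return Simplices
-- ===== SOURCE B (Python) =====
-- def sorter1(N):
-- 	buckets = {}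
-- 	for s in N:
-- 		buckets.setdefault(len(s) - 1, []).append(s)
-- 	d = max(map(len, N), default=0) - 1
-- 	return {i: sorted(buckets.get(i, [])) for i in range(d + 1)}
-- ===== Notes on version B (the rewrite author's own statement) =====
-- stated objective: alternative
-- what changed: Replaces A's one-filtering-pass-over-N-per-dimension scan with a single bucketing pass into a dict keyed by len-1, then sorts each bucket once per dimension (intended as faster for many dimensions; a timing run measured 1.27-2.47x, not consistently >=1.5x).
import Mathlib
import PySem

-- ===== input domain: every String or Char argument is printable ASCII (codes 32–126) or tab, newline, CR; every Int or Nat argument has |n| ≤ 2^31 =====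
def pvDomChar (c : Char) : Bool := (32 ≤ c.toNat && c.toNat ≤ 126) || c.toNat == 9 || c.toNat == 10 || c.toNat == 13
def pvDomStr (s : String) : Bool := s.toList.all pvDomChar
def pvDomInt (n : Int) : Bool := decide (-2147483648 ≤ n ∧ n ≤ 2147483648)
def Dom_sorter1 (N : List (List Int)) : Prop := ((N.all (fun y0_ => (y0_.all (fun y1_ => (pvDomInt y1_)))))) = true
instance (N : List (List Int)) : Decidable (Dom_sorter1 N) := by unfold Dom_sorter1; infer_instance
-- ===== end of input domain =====

-- B replaces A's one-filtering-pass-over-N-per-dimension scan with a single bucketing pass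
-- into a dict keyed by len-1, then sorts each bucket once per dimension (alternative algorithm).


-- ===== PORT A =====
-- helper 'dimension': max length over N (starting from 0), minus one
def pvDimension (N : List (List Int)) : Int :=
  (N.foldl (fun out s => if (s.length : Int) > out then (s.length : Int) else out) 0) - 1

def sorter1 (N : List (List Int)) : List (Int × List (List Int)) :=
  let d := pvDimension N
  let Simplices :=
    (PySem.List.pyRange 0 (d + 1) 1).foldl
      (fun Simplices i =>
        let i_simplices :=
          N.foldl (fun acc s => if (s.length : Int) == i + 1 then acc ++ [s] else acc) []
        Simplices.insert i (PySem.List.sorted i_simplices (fun x => x) false))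
      PySem.Dict.empty
  Simplices.items

-- ===== PORT B =====
def sorter1_alt (N : List (List Int)) : List (Int × List (List Int)) :=
  -- buckets.setdefault(len(s)-1, []).append(s)  =  buckets[k] = buckets.get(k, []) ++ [s]
  let buckets :=
    N.foldl (fun b s => b.modify ((s.length : Int) - 1) [] (· ++ [s])) PySem.Dict.empty
  let d := PySem.List.maxD (N.map (fun s => (s.length : Int))) (fun x => x) 0 - 1
  -- the dict comprehension runs over the distinct fresh keys range(d+1): its items list is exactly this map
  (PySem.List.pyRange 0 (d + 1) 1).map
    (fun i => (i, PySem.List.sorted (buckets.getD i []) (fun x => x) false))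

-- ===== PRECONDITION & SPEC =====
def Spec_sorter1 (N : List (List Int)) (out : List (Int × List (List Int))) : Prop := out = sorter1_alt N
instance (N : List (List Int)) (out : List (Int × List (List Int))) : Decidable (Spec_sorter1 N out) := by unfold Spec_sorter1; infer_instance

-- ===== CLAIM (what is proved, stated in full; the proofs are below) =====
def Claim_equal_sorter1 : Prop := ∀ (N : List (List Int)), Dom_sorter1 N → Spec_sorter1 N (sorter1 N)

-- ===== LEMMAS AND PROOFS =====

-- A's running max (from 0) equals max?'s first-extremal fold, pushed through some
theorem pv_max?_cons : ∀ (L : List Int) (a : Int),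
    PySem.List.max? (a :: L) (fun x => x)
      = some (L.foldl (fun out x => if x > out then x else out) a) := by
  intro L
  induction L with
  | nil => intro a; rfl
  | cons h t ih =>
    intro a
    have step : PySem.List.max? (a :: h :: t) (fun x => x)
        = PySem.List.max? ((if h > a then h else a) :: t) (fun x => x) := by
      by_cases hc : a < h <;> simp [PySem.List.max?, hc, gt_iff_lt]
    rw [step, ih, List.foldl_cons]

theorem pv_dim_eq (N : List (List Int)) :
    N.foldl (fun out s => if (s.length : Int) > out then (s.length : Int) else out) 0
      = PySem.List.maxD (N.map (fun s => (s.length : Int))) (fun x => x) 0 := by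
  unfold PySem.List.maxD
  cases N with
  | nil => rfl
  | cons h t =>
    simp only [List.map_cons]
    rw [pv_max?_cons]
    simp only [Option.getD_some, List.foldl_map, List.foldl_cons]
    congr 1
    split <;> omega

-- the grouping fold: lookup in the bucket dict is the filter of N by key
theorem pv_getD_group {α : Type} (key : α → Int) (N : List α) (k : Int) :
    ∀ d : PySem.Dict Int (List α),
      (N.foldl (fun b s => b.modify (key s) [] (· ++ [s])) d).getD k []
        = d.getD k [] ++ N.filter (fun s => key s == k) := by
  induction N with
  | nil => intro d; simp
  | cons h t ih =>
    intro d
    simp only [List.foldl_cons, List.filter_cons]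
    rw [ih]
    by_cases hk : key h = k
    · subst hk
      simp [PySem.Dict.getD_modify_self]
    · simp [PySem.Dict.getD_modify_of_ne _ _ _ (Ne.symm hk), hk]

-- items of a fold inserting fresh distinct keys: the dict's items list is the map over the keys
theorem pv_items_foldl_insert (f : Int → List (List Int)) :
    ∀ (ks : List Int) (d : PySem.Dict Int (List (List Int))), ks.Nodup →
      (∀ k ∈ ks, d.contains k = false) →
      (ks.foldl (fun d i => d.insert i (f i)) d).items
        = d.items ++ ks.map (fun i => (i, f i)) := by
  intro ks
  induction ks with
  | nil => intro d _ _; simp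
  | cons k t ih =>
    intro d hnd hfresh
    have hk : d.contains k = false := hfresh k (by simp)
    have hins : (d.insert k (f k)).items = d.items ++ [(k, f k)] := by
      simp [PySem.Dict.insert, hk]
    simp only [List.foldl_cons]
    rw [ih (d.insert k (f k)) (List.Nodup.of_cons hnd) ?_, hins]
    · simp
    · intro k' hk'
      have hne : k' ≠ k := by
        rintro rfl; exact (List.nodup_cons.mp hnd).1 hk'
      simp only [PySem.Dict.contains, hins, List.any_append]
      have := hfresh k' (List.mem_cons_of_mem _ hk')
      simp only [PySem.Dict.contains] at this
      simp [this, Ne.symm hne]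

theorem sorter1_spec_aux : ∀ (N : List (List Int)), sorter1 N = sorter1_alt N := by
  intro N
  simp only [sorter1, sorter1_alt, pvDimension]
  rw [pv_dim_eq]
  rw [pv_items_foldl_insert _ _ _ (PySem.List.nodup_pyRange_one 0 _) (fun k _ => rfl)]
  rw [show (PySem.Dict.empty : PySem.Dict Int (List (List Int))).items = [] from rfl,
    List.nil_append]
  refine List.map_congr_left (fun i _ => ?_)
  refine congrArg (fun l => (i, PySem.List.sorted l (fun x => x) false)) ?_
  rw [PySem.List.foldl_append_if (fun s => (s.length : Int) == i + 1) (fun s => s) N []]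
  rw [pv_getD_group (fun s => (s.length : Int) - 1) N i PySem.Dict.empty]
  rw [List.map_id',
    show (PySem.Dict.empty : PySem.Dict Int (List (List Int))).getD i [] = [] from rfl,
    List.nil_append]
  refine List.filter_congr (fun s _ => ?_)
  have : ((s.length : Int) = i + 1) ↔ ((s.length : Int) - 1 = i) := by omega
  simp [this]

-- ===== VERDICT (by name: the statement is the Claim_ definition above) =====
theorem sorter1_spec : Claim_equal_sorter1 := by
  intro N _
  unfold Spec_sorter1
  exact sorter1_spec_aux N
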